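-- pv_equiv track=rewrite | github.com/MDAnalysis/mdanalysis | package/MDAnalysis/analysis/encore/utils.py | trm_indeces
-- ===== SOURCE A (Python) =====
-- def trm_indeces(a, b):
--     """
--     Generate (i,j) indeces of a triangular matrix, between elements a and b.
--     The matrix size is automatically determined from the number of elements.
--     For instance: trm_indeces((0,0),(2,1)) yields (0,0) (1,0) (1,1) (2,0)
--     (2,1).
--
--     Parameters
--     ----------
--
--     a : (int i, int j) tuple
--         starting matrix element.
--
--     b : (int i, int j) tuple
--         final matrix element.
--     """
--     i, j = a
--     while i < b[0]:
--         if i == j: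
--             yield (i, j)
--             j = 0
--             i += 1
--         else:
--             yield (i, j)
--             j += 1
--     while j <= b[1]:
--         yield (i, j)
--         j += 1
-- ===== SOURCE B (Python) =====
-- def trm_indeces(a, b):
--     """Nested row/column loops over the triangle instead of a flat state machine."""
--     i0, j0 = a
--     i1, j1 = b
--     if i0 < i1:
--         for i in range(i0, i1):
--             for j in range(j0 if i == i0 else 0, i + 1):
--                 yield (i, j)
--         for j in range(0, j1 + 1):
--             yield (i1, j)
--     else:
--         for j in range(j0, j1 + 1):
--             yield (i0, j)
-- ===== Notes on version B (the rewrite author's own statement) =====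
-- stated objective: simpler
-- what changed: Replaced A's flat state-machine while-loop (one (i,j) counter with an embedded diagonal-reset branch) by explicit nested for-loops over rows and columns plus a separate final/single-row loop.
-- outside the precondition, e.g. on trm_indeces((-3, -3), (1, -1)): A does not finish within the time limit, B returns [(-3, -3), (0, 0)]
import Mathlib
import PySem

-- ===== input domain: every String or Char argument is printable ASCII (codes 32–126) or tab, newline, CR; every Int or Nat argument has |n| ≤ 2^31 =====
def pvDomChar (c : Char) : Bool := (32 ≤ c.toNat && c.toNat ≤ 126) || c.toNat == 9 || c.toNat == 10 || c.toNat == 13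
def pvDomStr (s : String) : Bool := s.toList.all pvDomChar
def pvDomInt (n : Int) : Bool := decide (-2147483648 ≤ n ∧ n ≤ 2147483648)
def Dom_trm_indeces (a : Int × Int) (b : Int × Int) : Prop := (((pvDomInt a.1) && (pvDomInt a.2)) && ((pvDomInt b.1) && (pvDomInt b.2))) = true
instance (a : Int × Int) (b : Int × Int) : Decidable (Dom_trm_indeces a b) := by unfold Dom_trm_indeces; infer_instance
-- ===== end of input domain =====

-- B replaces A's flat state-machine while-loop by explicit nested row/column range loops
-- (same values in the same order; objective: simpler decomposition, not faster).

-- ===== PORT A =====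
-- A's first while loop, transliterated with a fuel guard for totality (the Python loop
-- diverges exactly on the inputs Pre_ excludes; the fuel below suffices on all others).
-- Returns (yielded list, final (i, j)).
def pvLoopA1 (b0 : Int) : Nat → Int → Int → List (Int × Int) × Int × Int
  | 0, i, j => ([], i, j)
  | fuel+1, i, j =>
    if i < b0 then
      if i = j then
        let r := pvLoopA1 b0 fuel (i+1) 0
        ((i, j) :: r.1, r.2)
      else
        let r := pvLoopA1 b0 fuel i (j+1)
        ((i, j) :: r.1, r.2)
    else ([], i, j)

-- fuel sufficient for the terminating runs of the first while loop
def pvFuelA (b0 i j : Int) : Nat := (b0 - i).toNat * (b0.toNat + 2) + (i - j).toNat + 1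

-- A's second while loop (always terminates)
def pvLoopA2 (i j b1 : Int) : List (Int × Int) :=
  if _h : j ≤ b1 then (i, j) :: pvLoopA2 i (j+1) b1 else []
termination_by (b1 + 1 - j).toNat
decreasing_by omega

def trm_indeces (a : Int × Int) (b : Int × Int) : List (Int × Int) :=
  let r := pvLoopA1 b.1 (pvFuelA b.1 a.1 a.2) a.1 a.2
  r.1 ++ pvLoopA2 r.2.1 r.2.2 b.2

-- ===== PORT B =====
def trm_indeces_alt (a : Int × Int) (b : Int × Int) : List (Int × Int) :=
  let i0 := a.1; let j0 := a.2; let i1 := b.1; let j1 := b.2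
  if i0 < i1 then
    ((PySem.List.pyRange i0 i1 1).flatMap (fun i =>
        (PySem.List.pyRange (if i = i0 then j0 else 0) (i+1) 1).map (fun j => (i, j))))
      ++ (PySem.List.pyRange 0 (j1+1) 1).map (fun j => (i1, j))
  else
    (PySem.List.pyRange j0 (j1+1) 1).map (fun j => (i0, j))

-- ===== PRECONDITION & SPEC =====
-- Pre_ excludes exactly the inputs on which A's first while loop never terminates
-- (the generator diverges, yielding no finite list): a.1 < b.1 with j overtaking i,
-- i.e. a.2 > a.1, or a diagonal reset to j = 0 above a still-negative row.
def Pre_trm_indeces (a : Int × Int) (b : Int × Int) : Prop :=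
  b.1 ≤ a.1 ∨ (a.2 ≤ a.1 ∧ (a.1 + 1 = b.1 ∨ 0 ≤ a.1 + 1))
instance (a : Int × Int) (b : Int × Int) : Decidable (Pre_trm_indeces a b) := by
  unfold Pre_trm_indeces; infer_instance

def pvWitness_trm_indeces : (Int × Int) × (Int × Int) := ((0, 0), (2, 1))

def Spec_trm_indeces (a : Int × Int) (b : Int × Int) (out : List (Int × Int)) : Prop := out = trm_indeces_alt a b
instance (a : Int × Int) (b : Int × Int) (out : List (Int × Int)) : Decidable (Spec_trm_indeces a b out) := by unfold Spec_trm_indeces; infer_instance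

-- ===== CLAIM (what is proved, stated in full; the proofs are below) =====
def Claim_equal_trm_indeces : Prop := ∀ (a : Int × Int) (b : Int × Int), Dom_trm_indeces a b → Pre_trm_indeces a b → Spec_trm_indeces a b (trm_indeces a b)

-- ===== LEMMAS AND PROOFS =====

-- the list of rows the first while loop produces, in B's nested-loop shape
def pvRows (b0 i j : Int) : List (Int × Int) :=
  (PySem.List.pyRange i b0 1).flatMap (fun r =>
    (PySem.List.pyRange (if r = i then j else 0) (r+1) 1).map (fun c => (r, c)))

lemma pvFlatMap_congr {α β : Type} (l : List α) (f g : α → List β)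
    (h : ∀ x ∈ l, f x = g x) : l.flatMap f = l.flatMap g := by
  induction l with
  | nil => rfl
  | cons x xs ih =>
    simp only [List.flatMap_cons]
    rw [h x (by simp), ih (fun y hy => h y (by simp [hy]))]

lemma pvLoopA2_spec (i j b1 : Int) :
    pvLoopA2 i j b1 = (PySem.List.pyRange j (b1+1) 1).map (fun c => (i, c)) := by
  induction j using pvLoopA2.induct b1 with
  | case1 j h ih =>
    rw [pvLoopA2, dif_pos h, PySem.List.pyRange_one_cons (show j < b1 + 1 by omega),
      List.map_cons, ih]
  | case2 j h =>
    rw [pvLoopA2, dif_neg h, PySem.List.pyRange_one_eq_nil (by omega), List.map_nil]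

lemma pvLoopA1_spec (b0 : Int) : ∀ (fuel : Nat) (i j : Int),
    (j ≤ i ∨ b0 ≤ i) → (b0 ≤ i + 1 ∨ -1 ≤ i) → pvFuelA b0 i j ≤ fuel →
    pvLoopA1 b0 fuel i j = (pvRows b0 i j, if i < b0 then (b0, (0:Int)) else (i, j)) := by
  intro fuel
  induction fuel with
  | zero =>
    intro i j _ _ hf
    exact absurd hf (Nat.not_succ_le_zero _)
  | succ fuel ih =>
    intro i j h1 h2 hf
    by_cases hib : i < b0
    · by_cases hij : i = j
      · subst hij
        -- fuel bookkeeping for the next row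
        have hf' : pvFuelA b0 (i+1) 0 ≤ fuel := by
          unfold pvFuelA at hf ⊢
          have hs : (b0 - i).toNat = (b0 - (i+1)).toNat + 1 := by omega
          rw [hs, Nat.succ_mul] at hf
          have h3 : (i + 1).toNat + 1 ≤ b0.toNat + 2 := by omega
          have h4 : (i - i).toNat = 0 := by omega
          have h5 : (i + 1 - 0).toNat = (i+1).toNat := by omega
          rw [h4] at hf; rw [h5]
          set m := (b0 - (i+1)).toNat * (b0.toNat + 2) with hm
          omega
        have ihs := ih (i+1) 0 (by omega) (by omega) hf'
        simp only [pvLoopA1, if_pos hib, if_true]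
        rw [ihs]
        simp only [Prod.mk.injEq]
        refine ⟨?_, ?_⟩
        · -- lists: (i, i) :: pvRows b0 (i+1) 0 = pvRows b0 i i
          unfold pvRows
          rw [PySem.List.pyRange_one_cons hib]
          simp only [List.flatMap_cons, if_true]
          rw [PySem.List.pyRange_one_singleton]
          simp only [List.map_cons, List.map_nil, List.singleton_append, List.cons.injEq, true_and]
          apply pvFlatMap_congr
          intro r hr
          have hri : i + 1 ≤ r := (PySem.List.mem_pyRange_one.mp hr).1
          rw [ite_self, if_neg (show ¬ (r = i) by omega)]
        · -- final states
          split_ifs with h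
          · rfl
          · have hb : i + 1 = b0 := by omega
            rw [hb]
      · have hji : j < i := by rcases h1 with h1 | h1 <;> omega
        have hf' : pvFuelA b0 i (j+1) ≤ fuel := by
          unfold pvFuelA at hf ⊢
          set m := (b0 - i).toNat * (b0.toNat + 2) with hm
          omega
        have ihs := ih i (j+1) (by omega) h2 hf'
        simp only [pvLoopA1, if_pos hib]
        rw [if_neg hij, ihs]
        simp only [Prod.mk.injEq]
        refine ⟨?_, ?_⟩
        · -- lists: (i, j) :: pvRows b0 i (j+1) = pvRows b0 i j
          unfold pvRows
          rw [PySem.List.pyRange_one_cons hib]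
          simp only [List.flatMap_cons, if_true]
          rw [PySem.List.pyRange_one_cons (show j < i + 1 by omega), List.map_cons]
          simp only [List.cons_append, List.cons.injEq, true_and]
          congr 1
          apply pvFlatMap_congr
          intro r hr
          have hri : i + 1 ≤ r := (PySem.List.mem_pyRange_one.mp hr).1
          rw [if_neg (show ¬ (r = i) by omega), if_neg (show ¬ (r = i) by omega)]
        · rw [if_pos hib]
    · simp only [pvLoopA1, if_neg hib]
      unfold pvRows
      rw [PySem.List.pyRange_one_eq_nil (by omega)]
      simp

-- ===== VERDICT (by name: the statement is the Claim_ definition above) =====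
theorem trm_indeces_spec : Claim_equal_trm_indeces := by
  unfold Claim_equal_trm_indeces Spec_trm_indeces
  intro a b _hdom hpre
  obtain ⟨i0, j0⟩ := a
  obtain ⟨i1, j1⟩ := b
  unfold trm_indeces trm_indeces_alt
  by_cases h : i0 < i1
  · have hpre' : j0 ≤ i0 ∧ (i0 + 1 = i1 ∨ 0 ≤ i0 + 1) := by
      unfold Pre_trm_indeces at hpre
      rcases hpre with h' | h'
      · omega
      · exact h'
    have hmain := pvLoopA1_spec i1 (pvFuelA i1 i0 j0) i0 j0 (Or.inl hpre'.1)
      (by omega) (le_refl _)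
    simp only at hmain ⊢
    rw [hmain, if_pos h, if_pos h]
    simp only
    rw [pvLoopA2_spec]
    rfl
  · have hmain := pvLoopA1_spec i1 (pvFuelA i1 i0 j0) i0 j0 (Or.inr (by omega))
      (by omega) (le_refl _)
    simp only at hmain ⊢
    rw [hmain, if_neg h, if_neg h]
    simp only
    rw [pvLoopA2_spec]
    unfold pvRows
    rw [PySem.List.pyRange_one_eq_nil (by omega)]
    simp
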